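-- pv_equiv track=rewrite | github.com/jcolinpatrick/kryptos | scripts/encoding/e_morse_binary_digital_01.py | timed_stream
-- ===== SOURCE A (Python) =====
-- def timed_stream(morse_text, mark='1', space='0'):
--     """ITU timed Morse waveform encoding."""
--     words = morse_text.split(' / ')
--     out = []
--     for wi, word in enumerate(words):
--         letters = word.split()
--         for li, letter in enumerate(letters):
--             for si, sym in enumerate(letter):
--                 out.append(mark * (1 if sym == '.' else 3))
--                 if si != len(letter) - 1:
--                     out.append(space)           # intra-element gap
--             if li != len(letters) - 1:
--                 out.append(space * 3)           # inter-letter gap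
--         if wi != len(words) - 1:
--             out.append(space * 7)               # inter-word gap
--     return ''.join(out)
-- ===== SOURCE B (Python) =====
-- def timed_stream(morse_text, mark='1', space='0'):
--     """ITU timed Morse waveform: one character-level pass (state machine), no split/join levels."""
--     out = []
--     seen = False   # a symbol has been emitted for the current word
--     prev = False   # the previous character was a symbol
--     i = 0
--     n = len(morse_text)
--     while i < n:
--         if morse_text.startswith(' / ', i):
--             out.append(space * 7)
--             seen = prev = False
--             i += 3
--         elif morse_text[i].isspace():
--             prev = False
--             i += 1
--         else:
--             if prev:
--                 out.append(space)
--             elif seen: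
--                 out.append(space * 3)
--             out.append(mark if morse_text[i] == '.' else mark * 3)
--             seen = prev = True
--             i += 1
--     return ''.join(out)
-- ===== Notes on version B (the rewrite author's own statement) =====
-- stated objective: alternative
-- what changed: Replaces the three-level split/enumerate structure (split on the word separator, word.split(), per-letter loop with last-index gap checks) by a single left-to-right character-level state machine over the raw text that detects the word separator in place and emits each symbol together with the gap it owes, so no intermediate word or letter lists are ever built.
import Mathlib
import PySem

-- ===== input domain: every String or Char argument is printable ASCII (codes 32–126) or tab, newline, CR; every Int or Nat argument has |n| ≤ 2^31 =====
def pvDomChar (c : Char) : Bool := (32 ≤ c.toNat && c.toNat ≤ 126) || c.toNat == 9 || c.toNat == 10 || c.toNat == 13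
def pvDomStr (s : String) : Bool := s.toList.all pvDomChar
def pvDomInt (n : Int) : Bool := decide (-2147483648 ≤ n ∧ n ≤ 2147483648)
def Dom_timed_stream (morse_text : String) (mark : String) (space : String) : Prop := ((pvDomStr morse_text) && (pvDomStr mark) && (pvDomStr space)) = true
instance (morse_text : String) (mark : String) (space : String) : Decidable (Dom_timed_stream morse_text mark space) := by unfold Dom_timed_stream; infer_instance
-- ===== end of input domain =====

-- B replaces A's three-level split/enumerate traversal by a single character-level
-- state-machine pass over the raw text (objective: alternative, same cost).

-- Python's s * n for a string (shared leaf helper of both ports)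
def pvRep (s : String) (n : Int) : String := String.ofList (PySem.List.pyRepeat s.toList n)

-- ===== PORT A =====
def timed_stream (morse_text : String) (mark : String) (space : String) : String :=
  let words := (PySem.Str.split? morse_text " / ").getD []   -- sep is the nonempty literal ' / ', so split? is always some
  let out : List String :=
    (PySem.List.enumerate words).foldl (fun out p =>
      let letters := PySem.Str.split₀ p.2
      let out :=
        (PySem.List.enumerate letters).foldl (fun out q =>
          let letter := q.2.toList
          let out :=
            (PySem.List.enumerate letter).foldl (fun out r =>
              let out := out ++ [pvRep mark (if r.2 = '.' then 1 else 3)]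
              if r.1 ≠ (letter.length : Int) - 1 then out ++ [space] else out) out
          if q.1 ≠ (letters.length : Int) - 1 then out ++ [pvRep space 3] else out) out
      if p.1 ≠ (words.length : Int) - 1 then out ++ [pvRep space 7] else out) []
  PySem.Str.join "" out

-- ===== PORT B =====
-- B's while loop: one pass over the remaining characters with the two state flags
-- seen ("a symbol was emitted for the current word") and prev ("the previous
-- character was a symbol") and the accumulator out, exactly as in Source B.
def scanB (mark space : String) (cs : List Char) (seen prev : Bool) (out : List String) : List String :=
  match cs with
  | [] => out
  | c :: rest =>
    if PySem.Chars.startswith (c :: rest) (" / ".toList) then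
      scanB mark space (rest.drop 2) false false (out ++ [pvRep space 7])
    else if PySem.Chars.isspace c then
      scanB mark space rest seen false out
    else
      scanB mark space rest true true
        ((if prev then out ++ [space] else if seen then out ++ [pvRep space 3] else out)
          ++ [if c = '.' then mark else pvRep mark 3])
termination_by cs.length
decreasing_by
  · simp only [List.length_cons, List.length_drop]; omega
  · simp only [List.length_cons]; omega
  · simp only [List.length_cons]; omega

def timed_stream_alt (morse_text : String) (mark : String) (space : String) : String :=
  PySem.Str.join "" (scanB mark space morse_text.toList false false [])

-- ===== PRECONDITION & SPEC =====
def Spec_timed_stream (morse_text : String) (mark : String) (space : String) (out : String) : Prop := out = timed_stream_alt morse_text mark space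
instance (morse_text : String) (mark : String) (space : String) (out : String) : Decidable (Spec_timed_stream morse_text mark space out) := by unfold Spec_timed_stream; infer_instance

-- ===== CLAIM (what is proved, stated in full; the proofs are below) =====
def Claim_equal_timed_stream : Prop := ∀ (morse_text : String) (mark : String) (space : String), Dom_timed_stream morse_text mark space → Spec_timed_stream morse_text mark space (timed_stream morse_text mark space)

-- ===== LEMMAS AND PROOFS =====

-- the pieces A's loop over xs appends: h x for each x, with [sep] between consecutive elements
def gapCat {α : Type} (h : α → List String) (sep : String) : List α → List String
  | [] => []
  | [x] => h x
  | x :: y :: rest => h x ++ [sep] ++ gapCat h sep (y :: rest)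

-- A's enumerate-fold with the 'not last index' gap check produces exactly out0 ++ gapCat h sep xs
theorem gapLoop {α : Type} (h : α → List String) (sep : String) (N : Int) :
    ∀ (xs : List α) (s : Int) (out0 : List String), N = s + xs.length →
      List.foldl (fun out p => if p.1 ≠ N - 1 then (out ++ h p.2) ++ [sep] else out ++ h p.2)
        out0 (PySem.List.enumerate xs s)
      = out0 ++ gapCat h sep xs := by
  intro xs
  induction xs with
  | nil => intro s out0 _; simp [PySem.List.enumerate_nil, gapCat]
  | cons x xs ih =>
    intro s out0 hN
    rw [PySem.List.enumerate_cons]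
    cases xs with
    | nil =>
      have hs : s = N - 1 := by simp at hN; omega
      simp [PySem.List.enumerate_nil, gapCat, hs]
    | cons y rest =>
      have hs : s ≠ N - 1 := by simp at hN; omega
      have : N = (s + 1) + ((y :: rest).length : Int) := by simp at hN ⊢; omega
      simp only [List.foldl_cons, if_pos hs]
      rw [ih (s + 1) _ this]
      simp [gapCat]

-- per-level piece functions of A's folds
def pvH1 (mark : String) (sym : Char) : List String := [pvRep mark (if sym = '.' then 1 else 3)]
def pvH2 (mark space : String) (letter : String) : List String := gapCat (pvH1 mark) space letter.toList
def pvH3 (mark space : String) (word : String) : List String :=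
  gapCat (pvH2 mark space) (pvRep space 3) (PySem.Str.split₀ word)

theorem inner_fold (mark space : String) (letter : List Char) (out : List String) :
    List.foldl (fun out r =>
      let out := out ++ [pvRep mark (if r.2 = '.' then 1 else 3)];
      if r.1 ≠ (letter.length : Int) - 1 then out ++ [space] else out)
      out (PySem.List.enumerate letter)
    = out ++ gapCat (pvH1 mark) space letter := by
  exact gapLoop (pvH1 mark) space (letter.length : Int) letter 0 out (by simp)

theorem mid_fold (mark space : String) (word : String) (out : List String) :
    List.foldl (fun out q =>
      let letter := q.2.toList
      let out :=
        List.foldl (fun out r =>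
          let out := out ++ [pvRep mark (if r.2 = '.' then 1 else 3)];
          if r.1 ≠ (letter.length : Int) - 1 then out ++ [space] else out)
          out (PySem.List.enumerate letter)
      if q.1 ≠ ((PySem.Str.split₀ word).length : Int) - 1 then out ++ [pvRep space 3] else out)
      out (PySem.List.enumerate (PySem.Str.split₀ word))
    = out ++ pvH3 mark space word := by
  have hfun : (fun (out : List String) (q : Int × String) =>
      let letter := q.2.toList
      let out :=
        List.foldl (fun out r =>
          let out := out ++ [pvRep mark (if r.2 = '.' then 1 else 3)];
          if r.1 ≠ (letter.length : Int) - 1 then out ++ [space] else out)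
          out (PySem.List.enumerate letter)
      if q.1 ≠ ((PySem.Str.split₀ word).length : Int) - 1 then out ++ [pvRep space 3] else out)
      = (fun out q =>
          if q.1 ≠ ((PySem.Str.split₀ word).length : Int) - 1
          then (out ++ pvH2 mark space q.2) ++ [pvRep space 3] else out ++ pvH2 mark space q.2) := by
    funext out q
    show (if q.1 ≠ ((PySem.Str.split₀ word).length : Int) - 1
          then (List.foldl _ out (PySem.List.enumerate q.2.toList)) ++ [pvRep space 3]
          else List.foldl _ out (PySem.List.enumerate q.2.toList)) = _
    rw [inner_fold]
    simp only [pvH2]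
  rw [hfun]
  exact gapLoop (pvH2 mark space) (pvRep space 3) ((PySem.Str.split₀ word).length : Int)
    (PySem.Str.split₀ word) 0 out (by simp)

theorem outer_fold (mark space : String) (words : List String) :
    List.foldl (fun out p =>
      let letters := PySem.Str.split₀ p.2
      let out :=
        List.foldl (fun out q =>
          let letter := q.2.toList
          let out :=
            List.foldl (fun out r =>
              let out := out ++ [pvRep mark (if r.2 = '.' then 1 else 3)];
              if r.1 ≠ (letter.length : Int) - 1 then out ++ [space] else out)
              out (PySem.List.enumerate letter)
          if q.1 ≠ (letters.length : Int) - 1 then out ++ [pvRep space 3] else out)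
          out (PySem.List.enumerate letters)
      if p.1 ≠ (words.length : Int) - 1 then out ++ [pvRep space 7] else out)
      [] (PySem.List.enumerate words)
    = gapCat (fun w => pvH3 mark space w) (pvRep space 7) words := by
  have hfun : (fun (out : List String) (p : Int × String) =>
      let letters := PySem.Str.split₀ p.2
      let out :=
        List.foldl (fun out q =>
          let letter := q.2.toList
          let out :=
            List.foldl (fun out r =>
              let out := out ++ [pvRep mark (if r.2 = '.' then 1 else 3)];
              if r.1 ≠ (letter.length : Int) - 1 then out ++ [space] else out)
              out (PySem.List.enumerate letter)
          if q.1 ≠ (letters.length : Int) - 1 then out ++ [pvRep space 3] else out)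
          out (PySem.List.enumerate letters)
      if p.1 ≠ (words.length : Int) - 1 then out ++ [pvRep space 7] else out)
      = (fun out p =>
          if p.1 ≠ (words.length : Int) - 1
          then (out ++ pvH3 mark space p.2) ++ [pvRep space 7] else out ++ pvH3 mark space p.2) := by
    funext out p
    show (if p.1 ≠ (words.length : Int) - 1
          then (List.foldl _ out (PySem.List.enumerate (PySem.Str.split₀ p.2))) ++ [pvRep space 7]
          else List.foldl _ out (PySem.List.enumerate (PySem.Str.split₀ p.2))) = _
    rw [mid_fold]
  rw [hfun]
  simpa using gapLoop (fun w => pvH3 mark space w) (pvRep space 7) (words.length : Int) words 0 [] (by simp)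

-- ---- reference forms of the two Python splits ----

-- str.split(' / '): leftmost non-overlapping scan
def splitRef (cs : List Char) : List (List Char) :=
  match cs with
  | [] => [[]]
  | c :: rest =>
    if PySem.Chars.startswith (c :: rest) (" / ".toList) then
      [] :: splitRef (rest.drop 2)
    else (splitRef rest).modifyHead (c :: ·)
termination_by cs.length
decreasing_by
  · simp only [List.length_cons, List.length_drop]; omega
  · simp only [List.length_cons]; omega

-- str.split(): whitespace runs separate maximal non-space runs
def split0Ref (cs : List Char) : List (List Char) :=
  match cs with
  | [] => []
  | c :: rest =>
    if PySem.Chars.isspace c then split0Ref rest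
    else (c :: rest.takeWhile (fun d => !PySem.Chars.isspace d))
          :: split0Ref (rest.dropWhile (fun d => !PySem.Chars.isspace d))
termination_by cs.length
decreasing_by
  · simp only [List.length_cons]; omega
  · have := List.length_dropWhile_le (fun d => !PySem.Chars.isspace d) rest
    simp only [List.length_cons]; omega

theorem splitRef_ne_nil (cs : List Char) : splitRef cs ≠ [] := by
  fun_induction splitRef cs with
  | case1 => simp
  | case2 => simp
  | case3 _ _ _ ih =>
    cases h : splitRef _ with
    | nil => exact absurd h ih
    | cons p ps => simp [h]

theorem modifyHead_id' (l : List (List Char)) :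
    l.modifyHead (fun x => x) = l := by
  cases l <;> simp

theorem splitOn_go_eq : ∀ (fuel : Nat) (l cur : List Char) (acc : List (List Char)),
    l.length < fuel →
    PySem.Chars.splitOn.go (" / ".toList) fuel l cur acc
    = acc.reverse ++ (splitRef l).modifyHead (cur.reverse ++ ·) := by
  intro fuel
  induction fuel with
  | zero => intro l cur acc h; omega
  | succ m ih =>
    intro l cur acc h
    cases l with
    | nil =>
      rw [splitRef]
      simp [PySem.Chars.splitOn.go]
    | cons c rest =>
      rw [splitRef]
      by_cases hp : PySem.Chars.startswith (c :: rest) (" / ".toList)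
      · have hp' : (" / ".toList).isPrefixOf (c :: rest) = true := hp
        have hlen : (rest.drop 2).length < m := by
          simp only [List.length_cons] at h
          have := List.length_drop (l := rest) (i := 2)
          omega
        have hdrop : List.drop (" / ".toList).length (c :: rest) = rest.drop 2 := by
          simp
        rw [PySem.Chars.splitOn.go, if_pos hp', hdrop, ih _ _ _ hlen, if_pos hp]
        simp [modifyHead_id']
      · have hp' : ¬ ((" / ".toList).isPrefixOf (c :: rest) = true) := hp
        have hlen : rest.length < m := by simp only [List.length_cons] at h; omega
        rw [PySem.Chars.splitOn.go, if_neg hp', ih _ _ _ hlen, if_neg hp]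
        cases hs : splitRef rest with
        | nil => exact absurd hs (splitRef_ne_nil rest)
        | cons p ps => simp

theorem splitOn_eq_splitRef (cs : List Char) :
    PySem.Chars.splitOn cs (" / ".toList) = splitRef cs := by
  rw [PySem.Chars.splitOn, splitOn_go_eq (cs.length + 1) cs [] [] (by omega)]
  simp [modifyHead_id']

theorem split0Ref_ws (c : Char) (rest : List Char) (hw : PySem.Chars.isspace c = true) :
    split0Ref (c :: rest) = split0Ref rest := by
  rw [split0Ref]; simp [hw]

theorem split0Ref_sym (c : Char) (rest : List Char) (hw : PySem.Chars.isspace c = false) :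
    split0Ref (c :: rest)
    = (c :: rest.takeWhile (fun d => !PySem.Chars.isspace d))
        :: split0Ref (rest.dropWhile (fun d => !PySem.Chars.isspace d)) := by
  rw [split0Ref]; simp [hw]

theorem split0Ref_nil : split0Ref [] = [] := by
  rw [split0Ref]

theorem split₀_go_eq : ∀ (l cur : List Char) (acc : List (List Char)),
    PySem.Chars.split₀.go l cur acc
    = acc.reverse ++ (if cur.isEmpty then split0Ref l
        else (cur.reverse ++ l.takeWhile (fun d => !PySem.Chars.isspace d))
              :: split0Ref (l.dropWhile (fun d => !PySem.Chars.isspace d))) := by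
  intro l
  induction l with
  | nil =>
    intro cur acc
    cases cur <;> simp [PySem.Chars.split₀.go, split0Ref]
  | cons c rest ih =>
    intro cur acc
    by_cases hw : PySem.Chars.isspace c
    · cases cur with
      | nil => simp [PySem.Chars.split₀.go, hw, ih, split0Ref_ws _ _ hw]
      | cons a as =>
        simp only [PySem.Chars.split₀.go, hw, if_true, List.isEmpty_cons,
          Bool.false_eq_true, ite_false]
        rw [ih]
        simp [hw, List.takeWhile_cons, List.dropWhile_cons, split0Ref_ws _ _ hw]
    · simp only [Bool.not_eq_true] at hw
      simp only [PySem.Chars.split₀.go, hw, Bool.false_eq_true, if_false]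
      rw [ih, split0Ref_sym _ _ hw]
      cases cur <;> simp [hw, List.takeWhile_cons, List.dropWhile_cons]

theorem split₀_eq_split0Ref (cs : List Char) :
    PySem.Chars.split₀ cs = split0Ref cs := by
  rw [PySem.Chars.split₀, split₀_go_eq]
  simp

-- ---- the token stream both programs produce, as a function of the raw text ----

def headSym (cs : List Char) : Bool :=
  match cs with
  | [] => false
  | c :: _ => !PySem.Chars.isspace c

def Tl (mark space : String) (l : List Char) : List String :=
  gapCat (fun c => [if c = '.' then mark else pvRep mark 3]) space l

def Tw (mark space : String) (w : List Char) : List String :=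
  gapCat (Tl mark space) (pvRep space 3) (split0Ref w)

def Tm (mark space : String) (cs : List Char) : List String :=
  gapCat (Tw mark space) (pvRep space 7) (splitRef cs)

-- the gap the scanner still owes before the next symbol, given the state and the current word
def gapW (space : String) (seen prev : Bool) (w : List Char) : List String :=
  if headSym w && prev then [space]
  else if seen && !(split0Ref w).isEmpty then [pvRep space 3] else []

theorem pvRep_one (s : String) : pvRep s 1 = s := by
  simp [pvRep, PySem.List.pyRepeat]

theorem gapCat_congr {α : Type} (h h' : α → List String) (sep : String) (xs : List α)
    (hh : ∀ x, h x = h' x) : gapCat h sep xs = gapCat h' sep xs := by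
  induction xs with
  | nil => simp [gapCat]
  | cons x xs ih =>
    cases xs with
    | nil => simp [gapCat, hh]
    | cons y r => simp only [gapCat, hh, ih]

theorem gapCat_map {α β : Type} (h : β → List String) (g : α → β) (sep : String) (xs : List α) :
    gapCat h sep (xs.map g) = gapCat (fun x => h (g x)) sep xs := by
  induction xs with
  | nil => simp [gapCat]
  | cons x xs ih =>
    cases xs with
    | nil => simp [gapCat]
    | cons y r =>
      simp only [List.map_cons] at ih
      simp only [List.map_cons, gapCat, ih]

theorem gapCat_head_ext {α : Type} (h : α → List String) (sep : String) (x' x : α)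
    (xs : List α) (pre : List String) (hx : h x' = pre ++ h x) :
    gapCat h sep (x' :: xs) = pre ++ gapCat h sep (x :: xs) := by
  cases xs with
  | nil => simp [gapCat, hx]
  | cons y r => simp [gapCat, hx]

-- a word starting with a symbol: its encoding is that symbol's token plus the owed gap plus the rest
theorem Tw_cons_sym (mark space : String) (c : Char) (w : List Char)
    (hc : PySem.Chars.isspace c = false) :
    Tw mark space (c :: w)
    = [if c = '.' then mark else pvRep mark 3] ++ gapW space true true w ++ Tw mark space w := by
  rw [Tw, split0Ref_sym c w hc]
  cases w with
  | nil =>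
    simp [gapCat, Tl, gapW, headSym, split0Ref_nil, Tw, List.takeWhile_nil, List.dropWhile_nil]
  | cons d w' =>
    by_cases hd : PySem.Chars.isspace d
    · rw [List.takeWhile_cons_of_neg (by simp [hd]), List.dropWhile_cons_of_neg (by simp [hd]),
        split0Ref_ws d w' hd, Tw, split0Ref_ws d w' hd, gapW]
      simp only [headSym, hd, Bool.not_true, Bool.false_and, Bool.false_eq_true, if_false,
        Bool.true_and, split0Ref_ws d w' hd]
      cases hsw : split0Ref w' with
      | nil => simp [gapCat, Tl]
      | cons L ls => simp [gapCat, Tl]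
    · simp only [Bool.not_eq_true] at hd
      rw [List.takeWhile_cons_of_pos (by simp [hd]), Tw, split0Ref_sym d w' hd, gapW]
      simp only [headSym, hd, Bool.not_false, Bool.true_and, if_true]
      rw [List.dropWhile_cons_of_pos (by simp [hd])]
      rw [gapCat_head_ext (Tl mark space) (pvRep space 3)
        (c :: d :: w'.takeWhile (fun x => !PySem.Chars.isspace x))
        (d :: w'.takeWhile (fun x => !PySem.Chars.isspace x))
        (split0Ref (w'.dropWhile (fun x => !PySem.Chars.isspace x)))
        ([if c = '.' then mark else pvRep mark 3] ++ [space])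
        (by rw [Tl, Tl, gapCat])]

theorem splitRef_nil : splitRef [] = [[]] := by rw [splitRef]

theorem gapW_nilword (space : String) (seen prev : Bool) : gapW space seen prev [] = [] := by
  simp [gapW, headSym, split0Ref_nil]

theorem gapW_ff (space : String) (w : List Char) : gapW space false false w = [] := by
  simp [gapW]

theorem Tw_nil (mark space : String) : Tw mark space [] = [] := by
  rw [Tw, split0Ref_nil, gapCat]

theorem Tm_nil (mark space : String) : Tm mark space [] = [] := by
  rw [Tm, splitRef_nil, gapCat, Tw_nil]

theorem scanB_nil (mark space : String) (seen prev : Bool) (out : List String) :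
    scanB mark space [] seen prev out = out := by
  rw [scanB]

-- the scanner is the owed gap plus the token stream of the remaining text
theorem scanB_spec (mark space : String) : ∀ (n : Nat) (cs : List Char), cs.length ≤ n →
    ∀ (seen prev : Bool) (out : List String),
      scanB mark space cs seen prev out
      = out ++ gapW space seen prev ((splitRef cs).headI) ++ Tm mark space cs := by
  intro n
  induction n with
  | zero =>
    intro cs h seen prev out
    cases cs with
    | nil =>
      rw [scanB_nil, splitRef_nil, Tm_nil]
      simp [gapW_nilword]
    | cons c rest => simp at h
  | succ m ih =>
    intro cs h seen prev out
    cases cs with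
    | nil =>
      rw [scanB_nil, splitRef_nil, Tm_nil]
      simp [gapW_nilword]
    | cons c rest =>
      rw [scanB]
      by_cases hsep : PySem.Chars.startswith (c :: rest) (" / ".toList) = true
      · rw [if_pos hsep]
        obtain ⟨t, ht⟩ := (PySem.Chars.startswith_iff _ _).mp hsep
        have ht' : (' ' :: '/' :: ' ' :: t : List Char) = c :: rest := ht
        have hrest : rest = '/' :: ' ' :: t := by injection ht' with _ h2; exact h2.symm
        have hdrop : rest.drop 2 = t := by rw [hrest]; rfl
        have hlen : t.length ≤ m := by rw [hrest] at h; simp at h; omega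
        rw [hdrop, ih t hlen false false (out ++ [pvRep space 7]), gapW_ff]
        cases hst : splitRef t with
        | nil => exact absurd hst (splitRef_ne_nil t)
        | cons p ps =>
          have htm : Tm mark space (c :: rest)
              = [pvRep space 7] ++ Tm mark space t := by
            rw [Tm, splitRef, if_pos hsep, hdrop, hst, gapCat, Tw_nil, Tm, hst]
            simp
          have hgap : gapW space seen prev ((splitRef (c :: rest)).headI) = [] := by
            rw [splitRef, if_pos hsep, hdrop, hst]
            simp [gapW_nilword]
          rw [htm, hgap]
          simp [List.append_assoc]
      · rw [if_neg hsep]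
        have hlen : rest.length ≤ m := by simp at h; omega
        cases hsr : splitRef rest with
        | nil => exact absurd hsr (splitRef_ne_nil rest)
        | cons p ps =>
          by_cases hw : PySem.Chars.isspace c
          · rw [if_pos hw, ih rest hlen seen false out]
            have htm : Tm mark space (c :: rest) = Tm mark space rest := by
              rw [Tm, splitRef, if_neg hsep, hsr]
              simp only [List.modifyHead_cons]
              rw [gapCat_head_ext (Tw mark space) (pvRep space 7) (c :: p) p ps []
                (by rw [Tw, split0Ref_ws c p hw, Tw]; simp), Tm, hsr]
              simp
            have hgap : gapW space seen prev ((splitRef (c :: rest)).headI)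
                = gapW space seen false ((splitRef rest).headI) := by
              rw [splitRef, if_neg hsep, hsr]
              simp [gapW, headSym, hw, split0Ref_ws c p hw]
            rw [htm, hgap]
          · simp only [Bool.not_eq_true] at hw
            rw [if_neg (by simp [hw]), ih rest hlen true true _]
            have htm : Tm mark space (c :: rest)
                = ([if c = '.' then mark else pvRep mark 3] ++ gapW space true true p)
                    ++ Tm mark space rest := by
              rw [Tm, splitRef, if_neg hsep, hsr]
              simp only [List.modifyHead_cons]
              rw [gapCat_head_ext (Tw mark space) (pvRep space 7) (c :: p) p ps
                ([if c = '.' then mark else pvRep mark 3] ++ gapW space true true p)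
                (by rw [Tw_cons_sym mark space c p hw]), Tm, hsr]
            have hgap : gapW space seen prev ((splitRef (c :: rest)).headI)
                = (if prev = true then [space] else if seen = true then [pvRep space 3] else []) := by
              rw [splitRef, if_neg hsep, hsr]
              simp only [List.modifyHead_cons, List.headI]
              rw [gapW, split0Ref_sym c p hw]
              cases prev <;> cases seen <;> simp [headSym, hw]
            rw [htm, hgap, hsr]
            cases prev <;> cases seen <;> simp [List.append_assoc]

theorem pvH3_eq (mark space : String) (w : String) :
    pvH3 mark space w = Tw mark space w.toList := by
  have h1 : (PySem.Str.split₀ w).map String.toList = split0Ref w.toList := by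
    rw [PySem.Str.split₀_map_toList, split₀_eq_split0Ref]
  rw [pvH3, Tw, ← h1, gapCat_map]
  apply gapCat_congr
  intro s
  rw [pvH2, Tl]
  apply gapCat_congr
  intro c
  by_cases hc : c = '.' <;> simp [pvH1, pvRep_one, hc]

-- ===== VERDICT (by name: the statement is the Claim_ definition above) =====
theorem timed_stream_spec : Claim_equal_timed_stream := by
  intro morse_text mark space _
  show timed_stream morse_text mark space = timed_stream_alt morse_text mark space
  simp only [timed_stream, timed_stream_alt]
  rw [outer_fold,
    scanB_spec mark space morse_text.toList.length morse_text.toList le_rfl false false [],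
    gapW_ff]
  simp only [List.nil_append]
  have h := PySem.Str.split?_map morse_text " / "
  rw [PySem.Chars.split?, if_neg (by decide)] at h
  cases hs : PySem.Str.split? morse_text " / " with
  | none => rw [hs] at h; simp at h
  | some ws =>
    rw [hs] at h
    simp only [Option.map_some, Option.some.injEq] at h
    have hmap : ws.map String.toList = splitRef morse_text.toList :=
      h.trans (splitOn_eq_splitRef _)
    simp only [hs, Option.getD_some]
    congr 1
    rw [Tm, ← hmap, gapCat_map]
    exact gapCat_congr _ _ _ _ (fun w => pvH3_eq mark space w)
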